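-- pv_equiv track=rewrite | github.com/lsst-sqre/sasquatch | src/sasquatch/line_protocol.py | _iter_field_ranges
-- ===== SOURCE A (Python) =====
-- from collections.abc import Callable, Iterator
--
-- def _iter_field_ranges(field_set: str) -> Iterator[tuple[int, int, int]]:
--     """Yield field slice boundaries and key/value separator positions."""
--     escaped = False
--     in_quotes = False
--     field_start = 0
--     separator_index = -1
--
--     for index, char in enumerate(field_set):
--         if escaped:
--             escaped = False
--             continue
--         if char == "\\":
--             escaped = True
--             continue
--         if char == '"':
--             in_quotes = not in_quotes
--             continue
--         if char == "=" and separator_index == -1 and not in_quotes: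
--             separator_index = index
--             continue
--         if char == "," and not in_quotes:
--             yield field_start, index, separator_index
--             field_start = index + 1
--             separator_index = -1
--
--     yield field_start, len(field_set), separator_index
-- ===== SOURCE B (Python) =====
-- def _iter_field_ranges(field_set):
--     """Yield field slice boundaries and key/value separator positions."""
--     # Pass 1: tokenize into field (start, end) boundaries.
--     bounds = []
--     escaped = False
--     in_quotes = False
--     start = 0
--     for i, ch in enumerate(field_set):
--         if escaped:
--             escaped = False
--         elif ch == "\\":
--             escaped = True
--         elif ch == '"':
--             in_quotes = not in_quotes
--         elif ch == "," and not in_quotes: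
--             bounds.append((start, i))
--             start = i + 1
--     bounds.append((start, len(field_set)))
--     # Pass 2: within each field, find the first unquoted, unescaped '='.
--     for s, e in bounds:
--         sep = -1
--         escaped = False
--         in_quotes = False
--         for i in range(s, e):
--             ch = field_set[i]
--             if escaped:
--                 escaped = False
--             elif ch == "\\":
--                 escaped = True
--             elif ch == '"':
--                 in_quotes = not in_quotes
--             elif ch == "=" and not in_quotes:
--                 sep = i
--                 break
--         yield s, e, sep
-- ===== Notes on version B (the rewrite author's own statement) =====
-- stated objective: alternative
-- what changed: Replaces A's single interleaved state machine (which tracks field_start and separator_index while yielding at commas) with a two-pass tokenize-then-parse decomposition: pass 1 records field (start, end) boundaries at unquoted unescaped commas, pass 2 re-scans each field with fresh escape/quote state and breaks at the first unquoted unescaped key/value separator.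
import Mathlib
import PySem

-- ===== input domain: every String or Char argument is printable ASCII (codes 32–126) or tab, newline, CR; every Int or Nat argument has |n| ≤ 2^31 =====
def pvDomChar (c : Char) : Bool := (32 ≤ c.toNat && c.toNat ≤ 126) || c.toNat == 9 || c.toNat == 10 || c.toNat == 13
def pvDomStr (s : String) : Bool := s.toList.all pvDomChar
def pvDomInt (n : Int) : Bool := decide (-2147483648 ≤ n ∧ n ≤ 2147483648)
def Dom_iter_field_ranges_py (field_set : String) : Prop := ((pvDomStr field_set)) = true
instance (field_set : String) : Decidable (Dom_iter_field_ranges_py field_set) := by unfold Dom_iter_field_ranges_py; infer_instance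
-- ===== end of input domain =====

-- B replaces A's single interleaved yield-as-you-go state machine by a tokenize-then-parse decomposition
-- (pass 1 records field boundaries, pass 2 re-scans each field for its first key/value separator); objective: alternative, same value.


-- ===== PORT A =====
-- A: single interleaved scan yielding (field_start, index, separator_index) at unquoted commas.
def pvAGo (cs : List Char) (i : Nat) (esc inq : Bool) (fs : Nat) (sep : Int)
    (acc : List (Int × Int × Int)) (n : Nat) : List (Int × Int × Int) :=
  match cs with
  | [] => acc ++ [((fs : Int), (n : Int), sep)]
  | c :: rest =>
    if esc then pvAGo rest (i+1) false inq fs sep acc n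
    else if c = '\\' then pvAGo rest (i+1) true inq fs sep acc n
    else if c = '"' then pvAGo rest (i+1) esc (!inq) fs sep acc n
    else if c = '=' ∧ sep = -1 ∧ ¬ inq then pvAGo rest (i+1) esc inq fs (i : Int) acc n
    else if c = ',' ∧ ¬ inq then
      pvAGo rest (i+1) esc inq (i+1) (-1) (acc ++ [((fs : Int), (i : Int), sep)]) n
    else pvAGo rest (i+1) esc inq fs sep acc n

def iter_field_ranges_py (field_set : String) : List (Int × Int × Int) :=
  pvAGo field_set.toList 0 false false 0 (-1) [] field_set.toList.length

-- ===== PORT B =====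
-- B pass 1: record field (start, end) boundaries at unquoted unescaped commas.
def pvBounds (cs : List Char) (i : Nat) (esc inq : Bool) (start : Nat)
    (acc : List (Nat × Nat)) (n : Nat) : List (Nat × Nat) :=
  match cs with
  | [] => acc ++ [(start, n)]
  | c :: rest =>
    if esc then pvBounds rest (i+1) false inq start acc n
    else if c = '\\' then pvBounds rest (i+1) true inq start acc n
    else if c = '"' then pvBounds rest (i+1) esc (!inq) start acc n
    else if c = ',' ∧ ¬ inq then pvBounds rest (i+1) esc inq (i+1) (acc ++ [(start, i)]) n
    else pvBounds rest (i+1) esc inq start acc n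

-- B pass 2: scan cs (= the tail of the string from index i) up to index e for the
-- first unquoted, unescaped '='; -1 if none (Python's for i in range(s, e) with break).
def pvSep (cs : List Char) (i e : Nat) (esc inq : Bool) : Int :=
  match cs with
  | [] => -1
  | c :: rest =>
    if e ≤ i then -1
    else if esc then pvSep rest (i+1) e false inq
    else if c = '\\' then pvSep rest (i+1) e true inq
    else if c = '"' then pvSep rest (i+1) e esc (!inq)
    else if c = '=' ∧ ¬ inq then (i : Int)
    else pvSep rest (i+1) e esc inq

def iter_field_ranges_py_alt (field_set : String) : List (Int × Int × Int) :=
  (pvBounds field_set.toList 0 false false 0 [] field_set.toList.length).map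
    (fun se => ((se.1 : Int), (se.2 : Int),
      pvSep (field_set.toList.drop se.1) se.1 se.2 false false))

-- ===== PRECONDITION & SPEC =====
def Spec_iter_field_ranges_py (field_set : String) (out : List (Int × Int × Int)) : Prop := out = iter_field_ranges_py_alt field_set
instance (field_set : String) (out : List (Int × Int × Int)) : Decidable (Spec_iter_field_ranges_py field_set out) := by unfold Spec_iter_field_ranges_py; infer_instance

-- ===== CLAIM (what is proved, stated in full; the proofs are below) =====
def Claim_equal_iter_field_ranges_py : Prop := ∀ (field_set : String), Dom_iter_field_ranges_py field_set → Spec_iter_field_ranges_py field_set (iter_field_ranges_py field_set)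

-- ===== LEMMAS AND PROOFS =====

-- A without accumulator.
def pvG (cs : List Char) (i : Nat) (esc inq : Bool) (fs : Nat) (sep : Int) (n : Nat) :
    List (Int × Int × Int) :=
  match cs with
  | [] => [((fs : Int), (n : Int), sep)]
  | c :: rest =>
    if esc then pvG rest (i+1) false inq fs sep n
    else if c = '\\' then pvG rest (i+1) true inq fs sep n
    else if c = '"' then pvG rest (i+1) esc (!inq) fs sep n
    else if c = '=' ∧ sep = -1 ∧ ¬ inq then pvG rest (i+1) esc inq fs (i : Int) n
    else if c = ',' ∧ ¬ inq then
      ((fs : Int), (i : Int), sep) :: pvG rest (i+1) esc inq (i+1) (-1) n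
    else pvG rest (i+1) esc inq fs sep n

-- bounds without accumulator.
def pvBB (cs : List Char) (i : Nat) (esc inq : Bool) (start : Nat) (n : Nat) :
    List (Nat × Nat) :=
  match cs with
  | [] => [(start, n)]
  | c :: rest =>
    if esc then pvBB rest (i+1) false inq start n
    else if c = '\\' then pvBB rest (i+1) true inq start n
    else if c = '"' then pvBB rest (i+1) esc (!inq) start n
    else if c = ',' ∧ ¬ inq then (start, i) :: pvBB rest (i+1) esc inq (i+1) n
    else pvBB rest (i+1) esc inq start n

theorem pvAGo_eq_pvG (cs : List Char) : ∀ (i : Nat) (esc inq : Bool) (fs : Nat) (sep : Int)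
    (acc : List (Int × Int × Int)) (n : Nat),
    pvAGo cs i esc inq fs sep acc n = acc ++ pvG cs i esc inq fs sep n := by
  induction cs with
  | nil => intros; simp [pvAGo, pvG]
  | cons c rest ih =>
    intro i esc inq fs sep acc n
    simp only [pvAGo, pvG]
    split_ifs <;> simp [ih]

theorem pvBounds_eq_pvBB (cs : List Char) : ∀ (i : Nat) (esc inq : Bool) (start : Nat)
    (acc : List (Nat × Nat)) (n : Nat),
    pvBounds cs i esc inq start acc n = acc ++ pvBB cs i esc inq start n := by
  induction cs with
  | nil => intros; simp [pvBounds, pvBB]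
  | cons c rest ih =>
    intro i esc inq start acc n
    simp only [pvBounds, pvBB]
    split_ifs <;> simp [ih]

theorem pvBB_head (cs : List Char) : ∀ (i : Nat) (esc inq : Bool) (start : Nat) (n : Nat),
    ∃ e rest, pvBB cs i esc inq start n = (start, e) :: rest := by
  induction cs with
  | nil => intro i esc inq start n; exact ⟨n, [], rfl⟩
  | cons c rest ih =>
    intro i esc inq start n
    simp only [pvBB]
    split_ifs <;> first
      | exact ih _ _ _ _ _
      | exact ⟨i, pvBB rest (i+1) esc inq (i+1) n, rfl⟩

theorem pvBB_ends_ge (cs : List Char) : ∀ (i : Nat) (esc inq : Bool) (start : Nat),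
    ∀ se ∈ pvBB cs i esc inq start (i + cs.length), i ≤ se.2 := by
  induction cs with
  | nil => intro i esc inq start se h; simp [pvBB] at h; simp [h]
  | cons c rest ih =>
    intro i esc inq start se h
    simp only [pvBB] at h
    have hlen : i + (c :: rest).length = (i+1) + rest.length := by simp; omega
    rw [hlen] at h
    split_ifs at h with h1 h2 h3 h4
    · exact Nat.le_of_succ_le (ih (i+1) false inq start se h)
    · exact Nat.le_of_succ_le (ih (i+1) true inq start se h)
    · exact Nat.le_of_succ_le (ih (i+1) esc (!inq) start se h)
    · rcases List.mem_cons.mp h with h | h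
      · simp [h]
      · exact Nat.le_of_succ_le (ih (i+1) esc inq (i+1) se h)
    · exact Nat.le_of_succ_le (ih (i+1) esc inq start se h)

def pvFill (full : List Char) (l : List (Nat × Nat)) : List (Int × Int × Int) :=
  l.map (fun se => ((se.1 : Int), (se.2 : Int), pvSep (full.drop se.1) se.1 se.2 false false))

def pvFillFirst (full cs : List Char) (i : Nat) (esc inq : Bool) (sep : Int)
    (l : List (Nat × Nat)) : List (Int × Int × Int) :=
  match l with
  | [] => []
  | (s, e) :: rest =>
      ((s : Int), (e : Int), if sep = -1 then pvSep cs i e esc inq else sep) :: pvFill full rest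

theorem pvFillFirst_fresh (full cs : List Char) (s : Nat) (l : List (Nat × Nat))
    (e : Nat) (rest : List (Nat × Nat)) (hcs : cs = full.drop s) (hl : l = (s, e) :: rest) :
    pvFillFirst full cs s false false (-1) l = pvFill full l := by
  subst hcs; subst hl; simp [pvFillFirst, pvFill]

theorem pvG_eq_fill (cs : List Char) : ∀ (full : List Char) (i : Nat) (esc inq : Bool)
    (fs : Nat) (sep : Int), cs = full.drop i → i + cs.length = full.length →
    pvG cs i esc inq fs sep full.length =
      pvFillFirst full cs i esc inq sep (pvBB cs i esc inq fs full.length) := by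
  induction cs with
  | nil =>
    intro full i esc inq fs sep hdrop hlen
    by_cases hs : sep = -1 <;>
      simp [pvG, pvBB, pvFillFirst, pvFill, pvSep, hs]
  | cons c rest ih =>
    intro full i esc inq fs sep hdrop hlen
    have hdrop' : rest = full.drop (i+1) := by
      have h : full.drop (i+1) = (full.drop i).drop 1 := by rw [List.drop_drop]
      rw [h, ← hdrop]; rfl
    have hlen' : (i+1) + rest.length = full.length := by simp at hlen ⊢; omega
    have hends : ∀ esc' inq' fs', ∀ se ∈ pvBB rest (i+1) esc' inq' fs' full.length,
        i + 1 ≤ se.2 := by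
      intro esc' inq' fs' se h
      rw [hlen'.symm] at h
      exact pvBB_ends_ge rest (i+1) esc' inq' fs' se h
    by_cases h1 : esc
    · -- escaped: both scanners skip the character
      simp only [pvG, pvBB, if_pos h1]
      rw [ih full (i+1) false inq fs sep hdrop' hlen']
      obtain ⟨e, r, hbb⟩ := pvBB_head rest (i+1) false inq fs full.length
      rw [hbb]
      have he : i + 1 ≤ e := hends false inq fs (fs, e) (by rw [hbb]; simp)
      simp only [pvFillFirst]
      by_cases hs : sep = -1
      · simp [hs, pvSep, h1, Nat.not_le.mpr (by omega : i < e)]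
      · simp [hs]
    · by_cases h2 : c = '\\'
      · simp only [pvG, pvBB, if_neg h1, if_pos h2]
        rw [ih full (i+1) true inq fs sep hdrop' hlen']
        obtain ⟨e, r, hbb⟩ := pvBB_head rest (i+1) true inq fs full.length
        rw [hbb]
        have he : i + 1 ≤ e := hends true inq fs (fs, e) (by rw [hbb]; simp)
        simp only [pvFillFirst]
        by_cases hs : sep = -1
        · simp [hs, pvSep, h1, h2, Nat.not_le.mpr (by omega : i < e)]
        · simp [hs]
      · by_cases h3 : c = '"'
        · simp only [pvG, pvBB, if_neg h1, if_neg h2, if_pos h3]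
          rw [ih full (i+1) esc (!inq) fs sep hdrop' hlen']
          obtain ⟨e, r, hbb⟩ := pvBB_head rest (i+1) esc (!inq) fs full.length
          rw [hbb]
          have he : i + 1 ≤ e := hends esc (!inq) fs (fs, e) (by rw [hbb]; simp)
          simp only [pvFillFirst]
          by_cases hs : sep = -1
          · simp [hs, pvSep, h1, h3, Nat.not_le.mpr (by omega : i < e)]
          · simp [hs]
        · by_cases h4 : c = '=' ∧ sep = -1 ∧ ¬ inq
          · -- first '=' of the field
            obtain ⟨hc, hs, hq⟩ := h4
            have hnc : ¬ (c = ',' ∧ ¬ inq) := by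
              intro hx; rw [hc] at hx; exact absurd hx.1 (by decide)
            simp only [pvG, pvBB, if_neg h1, if_neg h2, if_neg h3,
              if_pos (⟨hc, hs, hq⟩ : c = '=' ∧ sep = -1 ∧ ¬ inq), if_neg hnc]
            rw [ih full (i+1) esc inq fs (i : Int) hdrop' hlen']
            obtain ⟨e, r, hbb⟩ := pvBB_head rest (i+1) esc inq fs full.length
            rw [hbb]
            have he : i + 1 ≤ e := hends esc inq fs (fs, e) (by rw [hbb]; simp)
            have hne : ((i : Int)) ≠ -1 := by omega
            simp only [pvFillFirst, if_neg hne, hs]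
            simp only [pvSep, if_neg (Nat.not_le.mpr (by omega : i < e)),
              if_neg h1, if_neg h2, if_neg h3, if_pos (⟨hc, hq⟩ : c = '=' ∧ ¬ inq)]
            simp
          · by_cases h5 : c = ',' ∧ ¬ inq
            · -- field boundary
              obtain ⟨hc, hq⟩ := h5
              simp only [pvG, pvBB, if_neg h1, if_neg h2, if_neg h3, if_neg h4,
                if_pos (⟨hc, hq⟩ : c = ',' ∧ ¬ inq)]
              have hesc : esc = false := by simpa using h1
              have hinq : inq = false := by simpa using hq
              subst hesc; subst hinq
              rw [ih full (i+1) false false (i+1) (-1) hdrop' hlen']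
              obtain ⟨e, r, hbb⟩ := pvBB_head rest (i+1) false false (i+1) full.length
              rw [pvFillFirst_fresh full rest (i+1) _ e r hdrop' hbb]
              simp only [pvFillFirst]
              by_cases hs : sep = -1
              · simp [hs, pvSep]
              · simp [hs]
            · -- ordinary character
              simp only [pvG, pvBB, if_neg h1, if_neg h2, if_neg h3, if_neg h4, if_neg h5]
              rw [ih full (i+1) esc inq fs sep hdrop' hlen']
              obtain ⟨e, r, hbb⟩ := pvBB_head rest (i+1) esc inq fs full.length
              rw [hbb]
              have he : i + 1 ≤ e := hends esc inq fs (fs, e) (by rw [hbb]; simp)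
              simp only [pvFillFirst]
              by_cases hs : sep = -1
              · have hq : ¬ (c = '=' ∧ ¬ inq) := by
                  intro ⟨hcc, hiq⟩; exact h4 ⟨hcc, hs, hiq⟩
                simp only [pvSep, if_neg (Nat.not_le.mpr (by omega : i < e)), if_neg h1,
                  if_neg h2, if_neg h3, if_neg hq, hs]
              · simp [hs]

-- ===== VERDICT (by name: the statement is the Claim_ definition above) =====
theorem iter_field_ranges_py_spec : Claim_equal_iter_field_ranges_py := by
  intro field_set _
  unfold Spec_iter_field_ranges_py iter_field_ranges_py iter_field_ranges_py_alt
  rw [pvAGo_eq_pvG, pvBounds_eq_pvBB]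
  simp only [List.nil_append]
  rw [pvG_eq_fill field_set.toList field_set.toList 0 false false 0 (-1) (by simp) (by simp)]
  obtain ⟨e, r, hbb⟩ := pvBB_head field_set.toList 0 false false 0 field_set.toList.length
  rw [pvFillFirst_fresh field_set.toList field_set.toList 0 _ e r
    (by simp : field_set.toList = List.drop 0 field_set.toList) hbb]
  rfl
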